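-- pv_equiv track=rewrite | github.com/alexandersimon83ukk/show-security | .github/scripts/generate-zap-summary.py | format_highest_risk
-- ===== SOURCE A (Python) =====
-- RISK_PRIORITY = {
--     'critical': 4,
--     'high': 3,
--     'medium': 2,
--     'low': 1,
--     'informational': 0,
--     'info': 0,
-- }
--
-- def format_highest_risk(rows: list[tuple[str, int]]) -> str:
--     positive_rows = [(risk, count) for risk, count in rows if count > 0]
--     if not positive_rows:
--         return 'Kein Alert erkannt'
--
--     highest_risk, _ = max(
--         positive_rows,
--         key=lambda row: (RISK_PRIORITY.get(row[0].strip().lower(), -1), row[1]),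
--     )
--     return highest_risk
-- ===== SOURCE B (Python) =====
-- RISK_PRIORITY = {
--     'critical': 4,
--     'high': 3,
--     'medium': 2,
--     'low': 1,
--     'informational': 0,
--     'info': 0,
-- }
--
-- def format_highest_risk(rows):
--     positive = [(risk, count) for risk, count in rows if count > 0]
--     # staged bucket scan: walk the finite priority levels from highest to lowest,
--     # take the first non-empty bucket and return its first maximal-count label
--     for level in (4, 3, 2, 1, 0, -1):
--         group = [(risk, count) for risk, count in positive
--                  if RISK_PRIORITY.get(risk.strip().lower(), -1) == level]
--         if group:
--             return max(group, key=lambda rc: rc[1])[0]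
--     return 'Kein Alert erkannt'
-- ===== Notes on version B (the rewrite author's own statement) =====
-- stated objective: alternative
-- what changed: Replaces the one-shot lexicographic-key max over positive rows by a staged bucket scan: iterate the six fixed priority levels from highest to lowest, filter the first non-empty bucket, and return its first maximal-count label (max by count only).
import Mathlib
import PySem

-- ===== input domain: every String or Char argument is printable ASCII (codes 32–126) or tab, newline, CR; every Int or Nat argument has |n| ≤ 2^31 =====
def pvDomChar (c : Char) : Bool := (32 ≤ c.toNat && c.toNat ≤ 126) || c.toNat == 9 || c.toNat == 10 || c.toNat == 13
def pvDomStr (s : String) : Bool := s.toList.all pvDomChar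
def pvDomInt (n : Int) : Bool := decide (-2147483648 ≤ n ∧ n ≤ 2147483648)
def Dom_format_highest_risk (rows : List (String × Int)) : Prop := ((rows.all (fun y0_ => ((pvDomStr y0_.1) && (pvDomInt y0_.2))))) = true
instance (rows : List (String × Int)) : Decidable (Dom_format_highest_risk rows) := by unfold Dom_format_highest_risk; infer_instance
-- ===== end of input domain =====

-- B replaces the single lexicographic-key max over positive rows by a staged bucket scan:
-- walk the six possible priority levels from highest to lowest, take the first non-empty
-- bucket and return its first maximal-count label (alternative decomposition, same cost).

-- ===== PORT A =====
-- module constant RISK_PRIORITY (shared by both Pythons)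
def RISK_PRIORITY : PySem.Dict String Int :=
  PySem.Dict.ofList [("critical", 4), ("high", 3), ("medium", 2), ("low", 1), ("informational", 0), ("info", 0)]

-- RISK_PRIORITY.get(row[0].strip().lower(), -1)  (the same expression appears in both Pythons)
def riskPrio (s : String) : Int :=
  PySem.Dict.getD RISK_PRIORITY (PySem.Str.lower (PySem.Str.strip s)) (-1)

def format_highest_risk (rows : List (String × Int)) : String :=
  let positive_rows := rows.filter (fun r => decide (r.2 > 0))
  if positive_rows.isEmpty then "Kein Alert erkannt"
  else
    match PySem.List.max2? positive_rows (fun r => riskPrio r.1) (fun r => r.2) with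
    | some m => m.1
    | none => ""  -- unreachable: positive_rows nonempty

-- ===== PORT B =====
-- the 'for level in (4, 3, 2, 1, 0, -1)' loop: first non-empty bucket wins
def bLoop (levels : List Int) (positive : List (String × Int)) : Option String :=
  match levels with
  | [] => none
  | p :: ps =>
    let group := positive.filter (fun r => decide (riskPrio r.1 = p))
    if group.isEmpty then bLoop ps positive
    else
      match PySem.List.max? group (fun r => r.2) with
      | some m => some m.1
      | none => none  -- unreachable: group nonempty

def format_highest_risk_alt (rows : List (String × Int)) : String :=
  let positive := rows.filter (fun r => decide (r.2 > 0))
  match bLoop [4, 3, 2, 1, 0, -1] positive with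
  | some l => l
  | none => "Kein Alert erkannt"

-- ===== PRECONDITION & SPEC =====
def Spec_format_highest_risk (rows : List (String × Int)) (out : String) : Prop := out = format_highest_risk_alt rows
instance (rows : List (String × Int)) (out : String) : Decidable (Spec_format_highest_risk rows out) := by unfold Spec_format_highest_risk; infer_instance

-- ===== CLAIM (what is proved, stated in full; the proofs are below) =====
def Claim_equal_format_highest_risk : Prop := ∀ (rows : List (String × Int)), Dom_format_highest_risk rows → Spec_format_highest_risk rows (format_highest_risk rows)

-- ===== LEMMAS AND PROOFS =====

-- the foldl step of A's max2?, specialised to A's two keys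
def a2Step (acc : Option (String × Int)) (x : String × Int) : Option (String × Int) :=
  match acc with
  | none => some x
  | some m =>
    if (decide (riskPrio m.1 < riskPrio x.1) || !decide (riskPrio x.1 < riskPrio m.1) && decide (m.2 < x.2)) = true
    then some x else some m

-- the foldl step of B's max? (key = count)
def mStep (acc : Option (String × Int)) (x : String × Int) : Option (String × Int) :=
  match acc with
  | none => some x
  | some m => if m.2 < x.2 then some x else some m

lemma foldl_mStep_some (l : List (String × Int)) (y : String × Int) :
    ∃ m, l.foldl mStep (some y) = some m := by
  induction l generalizing y with
  | nil => exact ⟨y, rfl⟩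
  | cons a l ihl =>
    simp only [List.foldl_cons, mStep]
    split <;> apply ihl

lemma foldl_a2Step_some (l : List (String × Int)) (y : String × Int) :
    ∃ m, l.foldl a2Step (some y) = some m := by
  induction l generalizing y with
  | nil => exact ⟨y, rfl⟩
  | cons a l ihl =>
    simp only [List.foldl_cons, a2Step]
    split <;> apply ihl

lemma max2?_eq_foldl (xs : List (String × Int)) :
    PySem.List.max2? xs (fun r => riskPrio r.1) (fun r => r.2) = xs.foldl a2Step none := by
  unfold PySem.List.max2?; congr 1; funext acc x; cases acc <;> rfl

lemma max?_eq_foldl (xs : List (String × Int)) :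
    PySem.List.max? xs (fun r => r.2) = xs.foldl mStep none := by
  unfold PySem.List.max?; congr 1; funext acc x; cases acc <;> rfl

lemma riskPrio_bounds (s : String) : -1 ≤ riskPrio s ∧ riskPrio s ≤ 4 := by
  unfold riskPrio
  simp only [PySem.Dict.getD, PySem.Dict.get?]
  have hit : RISK_PRIORITY.items = [("critical", 4), ("high", 3), ("medium", 2), ("low", 1), ("informational", 0), ("info", 0)] := by rfl
  rw [hit]
  cases h : List.find? (fun p => p.1 == PySem.Str.lower (PySem.Str.strip s)) [("critical", (4:Int)), ("high", 3), ("medium", 2), ("low", 1), ("informational", 0), ("info", 0)] with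
  | none => simp
  | some kv =>
    have hm := List.mem_of_find?_eq_some h
    simp only [List.mem_cons, List.not_mem_nil, or_false] at hm
    rcases hm with h1|h1|h1|h1|h1|h1 <;> subst h1 <;> simp

-- relation between A's running best-so-far and B's running best within the bucket of level p
def rel (p : Int) (accA accB : Option (String × Int)) : Prop :=
  (accB = none ∧ (accA = none ∨ ∃ m, accA = some m ∧ riskPrio m.1 < p)) ∨
  (∃ m, accA = some m ∧ accB = some m ∧ riskPrio m.1 = p)

-- core invariant: A's fold over xs and B's fold over the level-p bucket stay related
lemma fold_rel (p : Int) (xs : List (String × Int)) (accA accB : Option (String × Int))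
    (hxs : ∀ x ∈ xs, riskPrio x.1 ≤ p) (h : rel p accA accB) :
    rel p (xs.foldl a2Step accA) ((xs.filter (fun r => decide (riskPrio r.1 = p))).foldl mStep accB) := by
  induction xs generalizing accA accB with
  | nil => exact h
  | cons x t ih =>
    have hx : riskPrio x.1 ≤ p := hxs x (List.mem_cons_self)
    have ht : ∀ y ∈ t, riskPrio y.1 ≤ p := fun y hy => hxs y (List.mem_cons_of_mem _ hy)
    by_cases hp : riskPrio x.1 = p
    · -- x lands in the bucket
      have hf : decide (riskPrio x.1 = p) = true := by simp [hp]
      simp only [List.foldl_cons, List.filter_cons, hf, if_true]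
      apply ih _ _ ht
      rcases h with ⟨hB, hA⟩ | ⟨m, hA, hB, hm⟩
      · subst hB
        rcases hA with hA | ⟨m, hA, hm⟩
        · subst hA
          exact Or.inr ⟨x, rfl, rfl, hp⟩
        · subst hA
          have hc : (decide (riskPrio m.1 < riskPrio x.1) || !decide (riskPrio x.1 < riskPrio m.1) && decide (m.2 < x.2)) = true := by
            simp only [Bool.or_eq_true, Bool.and_eq_true, Bool.not_eq_true', decide_eq_true_eq, decide_eq_false_iff_not]
            omega
          exact Or.inr ⟨x, by simp [a2Step, hc], rfl, hp⟩
      · subst hA; subst hB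
        by_cases hcnt : m.2 < x.2
        · have hc : (decide (riskPrio m.1 < riskPrio x.1) || !decide (riskPrio x.1 < riskPrio m.1) && decide (m.2 < x.2)) = true := by
            simp only [Bool.or_eq_true, Bool.and_eq_true, Bool.not_eq_true', decide_eq_true_eq, decide_eq_false_iff_not]
            omega
          exact Or.inr ⟨x, by simp [a2Step, hc], by simp [mStep, hcnt], hp⟩
        · have hc : (decide (riskPrio m.1 < riskPrio x.1) || !decide (riskPrio x.1 < riskPrio m.1) && decide (m.2 < x.2)) = false := by
            simp only [Bool.or_eq_false_iff, Bool.and_eq_false_iff, Bool.not_eq_false', decide_eq_true_eq, decide_eq_false_iff_not]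
            omega
          exact Or.inr ⟨m, by simp [a2Step, hc], by simp [mStep, hcnt], hm⟩
    · -- x is outside the bucket: riskPrio x.1 < p
      have hlt : riskPrio x.1 < p := lt_of_le_of_ne hx hp
      have hf : decide (riskPrio x.1 = p) = false := by simp [hp]
      simp only [List.foldl_cons, List.filter_cons, hf, Bool.false_eq_true, if_false]
      apply ih _ _ ht
      rcases h with ⟨hB, hA⟩ | ⟨m, hA, hB, hm⟩
      · subst hB
        rcases hA with hA | ⟨m, hA, hm⟩
        · subst hA
          exact Or.inl ⟨rfl, Or.inr ⟨x, rfl, hlt⟩⟩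
        · subst hA
          refine Or.inl ⟨rfl, ?_⟩
          simp only [a2Step]
          split
          · exact Or.inr ⟨x, rfl, hlt⟩
          · exact Or.inr ⟨m, rfl, hm⟩
      · subst hA; subst hB
        have hc : (decide (riskPrio m.1 < riskPrio x.1) || !decide (riskPrio x.1 < riskPrio m.1) && decide (m.2 < x.2)) = false := by
          simp only [Bool.or_eq_false_iff, Bool.and_eq_false_iff, Bool.not_eq_false', decide_eq_true_eq, decide_eq_false_iff_not]
          omega
        exact Or.inr ⟨m, by simp [a2Step, hc], rfl, hm⟩

-- bLoop over a strictly decreasing level list covering all priorities of xs computes A's max2?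
lemma bLoop_correct (levels : List Int) (xs : List (String × Int))
    (hcov : ∀ x ∈ xs, riskPrio x.1 ∈ levels) (hsorted : levels.Pairwise (· > ·)) :
    bLoop levels xs =
      Option.map Prod.fst (PySem.List.max2? xs (fun r => riskPrio r.1) (fun r => r.2)) := by
  induction levels with
  | nil =>
    cases xs with
    | nil => rfl
    | cons x t => exact absurd (hcov x List.mem_cons_self) (List.not_mem_nil)
  | cons p ps ih =>
    rw [List.pairwise_cons] at hsorted
    unfold bLoop
    cases hg : xs.filter (fun r => decide (riskPrio r.1 = p)) with
    | nil =>
      have hcov' : ∀ x ∈ xs, riskPrio x.1 ∈ ps := by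
        intro x hx
        have hne : ¬ (riskPrio x.1 = p) := by
          intro he
          have : x ∈ xs.filter (fun r => decide (riskPrio r.1 = p)) :=
            List.mem_filter.mpr ⟨hx, by simp [he]⟩
          rw [hg] at this; exact List.not_mem_nil this
        rcases List.mem_cons.mp (hcov x hx) with h | h
        · exact absurd h hne
        · exact h
      simpa [hg] using ih hcov' hsorted.2
    | cons g gt =>
      have hle : ∀ x ∈ xs, riskPrio x.1 ≤ p := by
        intro x hx
        rcases List.mem_cons.mp (hcov x hx) with h | h
        · exact le_of_eq h
        · exact le_of_lt (hsorted.1 _ h)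
      have hrel := fold_rel p xs none none hle (Or.inl ⟨rfl, Or.inl rfl⟩)
      rw [hg] at hrel
      have hBsome : ∃ m, (g :: gt).foldl mStep none = some m := by
        simp only [List.foldl_cons, mStep]
        exact foldl_mStep_some gt g
      rcases hrel with ⟨hB, _⟩ | ⟨m, hA, hB, _⟩
      · rcases hBsome with ⟨m, hm⟩; rw [hm] at hB; exact absurd hB (by simp)
      · rw [max2?_eq_foldl, hA]
        simp [max?_eq_foldl, hB]

-- ===== VERDICT (by name: the statement is the Claim_ definition above) =====
theorem format_highest_risk_spec : Claim_equal_format_highest_risk := by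
  intro rows _
  unfold Spec_format_highest_risk format_highest_risk format_highest_risk_alt
  show (if (rows.filter (fun r => decide (r.2 > 0))).isEmpty then "Kein Alert erkannt"
        else
          match PySem.List.max2? (rows.filter (fun r => decide (r.2 > 0))) (fun r => riskPrio r.1) (fun r => r.2) with
          | some m => m.1
          | none => "") =
      match bLoop [4, 3, 2, 1, 0, -1] (rows.filter (fun r => decide (r.2 > 0))) with
      | some l => l
      | none => "Kein Alert erkannt"
  generalize rows.filter (fun r => decide (r.2 > 0)) = positive
  have hcov : ∀ x ∈ positive, riskPrio x.1 ∈ ([4, 3, 2, 1, 0, -1] : List Int) := by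
    intro x _
    have hb := riskPrio_bounds x.1
    simp only [List.mem_cons, List.not_mem_nil, or_false]
    omega
  have hsorted : ([4, 3, 2, 1, 0, -1] : List Int).Pairwise (· > ·) := by decide
  rw [bLoop_correct _ _ hcov hsorted]
  cases positive with
  | nil => simp [PySem.List.max2?]
  | cons h t =>
    have hne : ((h :: t : List (String × Int)).isEmpty) = false := rfl
    obtain ⟨m, hm⟩ := foldl_a2Step_some t h
    have hfold : (h :: t).foldl a2Step none = some m := by
      simpa [a2Step] using hm
    simp [hne, max2?_eq_foldl, hfold]
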